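-- pv_equiv track=rewrite | github.com/hey-now/NPL-assignment1 | CrossValidation.py | get_folds
-- ===== SOURCE A (Python) =====
-- folds_num = 10
--
-- def get_folds(X,Y):
--     folds = []
--     for i in range(folds_num):
--         folds.append([[], []])
--     for i in range(0, len(X)):
--         folds[i % folds_num][0].append(X[i])
--         folds[i % folds_num][1].append(Y[i])
--     return folds
-- ===== SOURCE B (Python) =====
-- folds_num = 10
--
-- def get_folds(X, Y):
--     n = len(X)
--     return [[[X[i] for i in range(j, n, 10)],
--              [Y[i] for i in range(j, n, 10)]]
--             for j in range(folds_num)]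
-- ===== Notes on version B (the rewrite author's own statement) =====
-- stated objective: alternative
-- what changed: Single round-robin pass that mutates 10 accumulating fold pairs is replaced by a per-fold strided gather: for each j in 0..9 build [X[j],X[j+10],...] and the matching Y elements directly by comprehension over range(j, len(X), 10).
import Mathlib
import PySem

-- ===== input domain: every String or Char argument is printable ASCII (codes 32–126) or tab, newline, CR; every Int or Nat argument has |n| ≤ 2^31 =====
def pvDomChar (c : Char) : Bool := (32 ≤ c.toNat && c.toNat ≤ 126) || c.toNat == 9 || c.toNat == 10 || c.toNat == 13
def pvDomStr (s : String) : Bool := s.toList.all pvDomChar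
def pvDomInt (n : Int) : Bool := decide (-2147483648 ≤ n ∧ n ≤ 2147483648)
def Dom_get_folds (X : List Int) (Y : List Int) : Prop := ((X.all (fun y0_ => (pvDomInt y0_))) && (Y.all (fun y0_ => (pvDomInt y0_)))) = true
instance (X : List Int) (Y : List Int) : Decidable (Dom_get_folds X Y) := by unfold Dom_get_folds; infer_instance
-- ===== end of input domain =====

-- B replaces A's single mutating round-robin pass with a per-fold strided gather (range(j, len(X), 10)); same cost, different decomposition.

-- ===== PORT A =====
def get_folds (X : List Int) (Y : List Int) : List (List (List Int)) :=
  let folds := (List.range 10).foldl (fun acc _ => acc ++ [[([] : List Int), ([] : List Int)]]) []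
  (List.range X.length).foldl (fun folds i =>
    let p := folds.getD (i % 10) []
    folds.set (i % 10) [p.getD 0 [] ++ [X.getD i 0], p.getD 1 [] ++ [Y.getD i 0]]) folds

-- ===== PORT B =====
def get_folds_alt (X : List Int) (Y : List Int) : List (List (List Int)) :=
  let n : Int := X.length
  (List.range 10).map (fun j : Nat =>
    [(PySem.List.pyRange (j : Int) n 10).map (fun i => PySem.List.pyGetD X i 0),
     (PySem.List.pyRange (j : Int) n 10).map (fun i => PySem.List.pyGetD Y i 0)])

-- ===== PRECONDITION & SPEC =====
-- Pre_ excludes exactly the inputs with len(Y) < len(X), on which both Pythons raise IndexError at Y[i].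
def Pre_get_folds (X : List Int) (Y : List Int) : Prop := X.length ≤ Y.length
instance (X : List Int) (Y : List Int) : Decidable (Pre_get_folds X Y) := by unfold Pre_get_folds; infer_instance
def pvWitness_get_folds : List Int × List Int := ([1, 2, 3], [4, 5, 6])

def Spec_get_folds (X : List Int) (Y : List Int) (out : List (List (List Int))) : Prop := out = get_folds_alt X Y
instance (X : List Int) (Y : List Int) (out : List (List (List Int))) : Decidable (Spec_get_folds X Y out) := by unfold Spec_get_folds; infer_instance

-- ===== CLAIM (what is proved, stated in full; the proofs are below) =====
def Claim_equal_get_folds : Prop := ∀ (X : List Int) (Y : List Int), Dom_get_folds X Y → Pre_get_folds X Y → Spec_get_folds X Y (get_folds X Y)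

-- ===== LEMMAS AND PROOFS =====

-- the elements of xs (with getD default 0) at the indices below k that are ≡ j (mod 10)
def pvSel (xs : List Int) (k j : Nat) : List Int :=
  ((List.range k).filter (fun i => i % 10 == j)).map (fun i => xs.getD i 0)

lemma pvSel_zero (xs : List Int) (j : Nat) : pvSel xs 0 j = [] := rfl

lemma pvSel_succ (xs : List Int) (k j : Nat) :
    pvSel xs (k + 1) j = pvSel xs k j ++ if k % 10 == j then [xs.getD k 0] else [] := by
  unfold pvSel
  rw [List.range_succ, List.filter_append, List.map_append]
  by_cases h : k % 10 == j <;> simp [h]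

-- B's strided index range for fold j is the filter of range n by i % 10 = j
lemma pyRange10_eq (j n : Nat) (hj : j < 10) :
    PySem.List.pyRange (j : Int) (n : Int) 10 =
      List.map (fun i : Nat => (i : Int)) ((List.range n).filter (fun i => i % 10 == j)) := by
  have hpl : List.Pairwise (· < ·) (PySem.List.pyRange (j : Int) (n : Int) 10) := by
    rw [PySem.List.pyRange_of_pos _ _ (by norm_num : (0:Int) < 10)]
    refine List.pairwise_map.mpr (List.pairwise_lt_range.imp ?_)
    intro a b h
    have : (a : Int) < b := by exact_mod_cast h
    omega
  have hpr : List.Pairwise (· < ·)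
      (List.map (fun i : Nat => (i : Int)) ((List.range n).filter (fun i => i % 10 == j))) := by
    refine List.pairwise_map.mpr ((List.pairwise_lt_range.filter _).imp ?_)
    intro a b h; exact_mod_cast h
  refine List.Perm.eq_of_pairwise (fun a b _ _ h1 h2 => by omega) hpl hpr ?_
  refine (List.perm_ext_iff_of_nodup (hpl.imp fun h => by omega) (hpr.imp fun h => by omega)).mpr ?_
  intro x
  rw [PySem.List.mem_pyRange_iff_of_pos (by norm_num : (0:Int) < 10)]
  simp only [List.mem_map, List.mem_filter, List.mem_range, beq_iff_eq]
  constructor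
  · rintro ⟨h1, h2, h3⟩
    exact ⟨x.toNat, ⟨by omega, by omega⟩, by omega⟩
  · rintro ⟨i, ⟨hi, him⟩, rfl⟩
    exact ⟨by omega, by omega, by omega⟩

lemma set_map_range {β : Type} (f : Nat → β) (n m : Nat) (v : β) :
    (List.map f (List.range n)).set m v
      = List.map (fun j => if j = m then v else f j) (List.range n) := by
  apply List.ext_getElem
  · simp
  · intro i h1 h2
    simp only [List.length_set, List.length_map, List.length_range] at h1
    rw [List.getElem_set]
    by_cases h : m = i
    · simp [h]
    · simp only [List.getElem_map, List.getElem_range]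
      rw [if_neg (fun hh : i = m => h hh.symm), if_neg h]

-- A's loop invariant: after k steps, fold j holds the selections of X and Y below k
lemma stateA (X Y : List Int) (k : Nat) :
    (List.range k).foldl (fun folds i =>
        let p := folds.getD (i % 10) []
        folds.set (i % 10) [p.getD 0 [] ++ [X.getD i 0], p.getD 1 [] ++ [Y.getD i 0]])
      ((List.range 10).foldl (fun acc _ => acc ++ [[([] : List Int), ([] : List Int)]]) [])
      = (List.range 10).map (fun j => [pvSel X k j, pvSel Y k j]) := by
  induction k with
  | zero =>
      simp only [List.range_zero, List.foldl_nil]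
      rw [PySem.List.foldl_append_singleton_eq_map]
      simp [pvSel_zero]
  | succ k ih =>
      rw [List.range_succ (n := k), List.foldl_append, ih, List.foldl_cons, List.foldl_nil]
      have hk : k % 10 < 10 := Nat.mod_lt _ (by omega)
      rw [PySem.List.getD_map_range _ _ _ _ hk, set_map_range]
      apply List.map_congr_left
      intro j hj
      by_cases h : j = k % 10
      · subst h
        simp [pvSel_succ, List.getD]
      · have hne : (k % 10 == j) = false := by
          simp only [beq_eq_false_iff_ne]; omega
        simp [pvSel_succ, hne, h]

-- ===== VERDICT (by name: the statement is the Claim_ definition above) =====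
theorem get_folds_spec : Claim_equal_get_folds := by
  intro X Y _ _
  unfold Spec_get_folds get_folds
  rw [stateA]
  simp only [get_folds_alt]
  apply List.map_congr_left
  intro j hj
  rw [List.mem_range] at hj
  rw [pyRange10_eq j X.length hj, List.map_map, List.map_map]
  unfold pvSel
  simp [Function.comp_def, PySem.List.pyGetD_natCast]
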